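-- pv_equiv track=rewrite | github.com/kemengzhang123/NASA_citation_worthiness | data_pipeline/dataset_builder.py | build_bibcode_index
-- ===== SOURCE A (Python) =====
-- REVIEW_JOURNAL_BIBCODES = {
--     "RvGeo",
--     "SSRv.",
--     "LRSP.",
--     "NewAR",
--     "ESRv.",
--     "NRvEE",
--     "P&SS.",
--     "ARA&A",
--     "A&ARv",
-- }
--
-- def build_bibcode_index(reference_records):
--     """Build an index mapping bibcodes to records for fast lookup"""
--     # Pre-filter non-review journals
--     filtered_records = {}
--     for ref in reference_records:
--         bibcode = ref.get("bibcode")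
--         if bibcode and bibcode[4:9] not in REVIEW_JOURNAL_BIBCODES:
--             if bibcode not in filtered_records:
--                 filtered_records[bibcode] = []
--             filtered_records[bibcode].append(ref)
--     return filtered_records
-- ===== SOURCE B (Python) =====
-- REVIEW_JOURNAL_BIBCODES = {
--     "RvGeo",
--     "SSRv.",
--     "LRSP.",
--     "NewAR",
--     "ESRv.",
--     "NRvEE",
--     "P&SS.",
--     "ARA&A",
--     "A&ARv",
-- }
--
-- def build_bibcode_index(reference_records):
--     """Build an index mapping bibcodes to records for fast lookup (two-pass version)"""
--     kept = [ref for ref in reference_records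
--             if ref.get("bibcode")
--             and ref.get("bibcode")[4:9] not in REVIEW_JOURNAL_BIBCODES]
--     keys = list(dict.fromkeys(ref["bibcode"] for ref in kept))
--     return {k: [ref for ref in kept if ref["bibcode"] == k] for k in keys}
-- ===== Notes on version B (the rewrite author's own statement) =====
-- stated objective: alternative
-- what changed: A builds the index in one pass with a mutable dict updated per record; B uses a declarative two-pass decomposition: filter the non-review records once, take the first-seen distinct bibcodes, and build each group by filtering the kept records per key.
import Mathlib
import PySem

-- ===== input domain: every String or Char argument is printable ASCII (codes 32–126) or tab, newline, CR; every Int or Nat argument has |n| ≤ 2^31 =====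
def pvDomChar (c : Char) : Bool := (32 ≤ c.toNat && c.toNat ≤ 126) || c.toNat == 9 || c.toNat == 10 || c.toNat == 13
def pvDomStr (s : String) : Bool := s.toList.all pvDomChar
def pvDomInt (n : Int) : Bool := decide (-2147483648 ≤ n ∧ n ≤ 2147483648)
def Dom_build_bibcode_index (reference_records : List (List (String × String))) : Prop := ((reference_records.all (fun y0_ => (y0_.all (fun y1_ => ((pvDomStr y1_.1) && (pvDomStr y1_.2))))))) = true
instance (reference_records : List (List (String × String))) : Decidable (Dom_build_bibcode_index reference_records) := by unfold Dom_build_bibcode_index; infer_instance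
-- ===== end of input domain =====

-- B groups the records in two passes (filter, first-seen distinct keys, one filter per key)
-- instead of A's single pass with a mutable dict; objective: alternative decomposition, not faster.

def pvReview : List String := ["RvGeo", "SSRv.", "LRSP.", "NewAR", "ESRv.", "NRvEE", "P&SS.", "ARA&A", "A&ARv"]

-- ref.get("bibcode") (a record is a Python dict; lookup = first match)
def pvGetBib (ref : List (String × String)) : Option String :=
  (PySem.Dict.mk ref).get? "bibcode"

-- ===== PORT A =====
def build_bibcode_index (reference_records : List (List (String × String))) : List (String × List (List (String × String))) :=
  (reference_records.foldl (fun filtered ref =>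
    match pvGetBib ref with
    | none => filtered
    | some bibcode =>
      -- 'if bibcode and bibcode[4:9] not in REVIEW_JOURNAL_BIBCODES'
      if bibcode ≠ "" ∧ PySem.Str.slice bibcode (some 4) (some 9) ∉ pvReview then
        -- 'if bibcode not in filtered_records: filtered_records[bibcode] = []'
        let filtered1 := if filtered.contains bibcode then filtered else filtered.insert bibcode []
        -- 'filtered_records[bibcode].append(ref)'  (d[k] = d[k] + [ref], k present)
        filtered1.modify bibcode [] (fun l => l ++ [ref])
      else filtered) PySem.Dict.empty).items

-- ===== PORT B =====
def pvKeep (ref : List (String × String)) : Bool :=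
  match pvGetBib ref with
  | none => false
  | some b => decide (b ≠ "") && decide (PySem.Str.slice b (some 4) (some 9) ∉ pvReview)

-- ref["bibcode"] of a kept record (always present there)
def pvKey (ref : List (String × String)) : String := (pvGetBib ref).getD ""

def build_bibcode_index_alt (reference_records : List (List (String × String))) : List (String × List (List (String × String))) :=
  let kept := reference_records.filter pvKeep
  let keys := PySem.List.dedup (kept.map pvKey)
  keys.map (fun k => (k, kept.filter (fun r => pvKey r == k)))

-- ===== PRECONDITION & SPEC =====
def Spec_build_bibcode_index (reference_records : List (List (String × String))) (out : List (String × List (List (String × String)))) : Prop := out = build_bibcode_index_alt reference_records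
instance (reference_records : List (List (String × String))) (out : List (String × List (List (String × String)))) : Decidable (Spec_build_bibcode_index reference_records out) := by unfold Spec_build_bibcode_index; infer_instance

-- ===== CLAIM (what is proved, stated in full; the proofs are below) =====
def Claim_equal_build_bibcode_index : Prop := ∀ (reference_records : List (List (String × String))), Dom_build_bibcode_index reference_records → Spec_build_bibcode_index reference_records (build_bibcode_index reference_records)

-- ===== LEMMAS AND PROOFS =====

-- inserting over a freshly inserted key overwrites it where the original dict had none
theorem pv_insert_insert_not_contains {κ ν : Type} [BEq κ] [LawfulBEq κ]
    (d : PySem.Dict κ ν) (k : κ) (v w : ν) (h : d.contains k = false) :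
    (d.insert k v).insert k w = d.insert k w := by
  have hall : ∀ p ∈ d.items, (p.1 == k) = false := by
    intro p hp
    by_contra hc
    have hm : (p.1 == k) = true := by simpa using hc
    have hck : d.contains k = true := List.any_eq_true.mpr ⟨p, hp, hm⟩
    rw [h] at hck
    exact Bool.false_ne_true hck
  simp only [PySem.Dict.insert, h, if_false, Bool.false_eq_true]
  rw [List.map_append]
  rw [List.map_congr_left (g := id) (by intro p hp; simp [hall p hp])]
  simp

-- A's body on a kept record equals a single modify-append
theorem pv_stepA_eq (d : PySem.Dict String (List (List (String × String)))) (b : String)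
    (ref : List (String × String)) :
    (let filtered1 := if d.contains b then d else d.insert b []
     filtered1.modify b [] (fun l => l ++ [ref])) = d.modify b [] (fun l => l ++ [ref]) := by
  show (if d.contains b then d else d.insert b []).modify b [] (fun l => l ++ [ref])
      = d.modify b [] (fun l => l ++ [ref])
  by_cases h : d.contains b = true
  · simp [h]
  · have h' : d.contains b = false := by simpa using h
    simp only [h', if_false, Bool.false_eq_true, PySem.Dict.modify,
      PySem.Dict.getD_insert_self, PySem.Dict.getD_of_not_contains _ _ h']
    exact pv_insert_insert_not_contains d b [] ([] ++ [ref]) h'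

-- A's fold is the canonical modify-append fold over the kept records
theorem pv_fold_eq (rs : List (List (String × String)))
    (d : PySem.Dict String (List (List (String × String)))) :
    rs.foldl (fun filtered ref =>
      match pvGetBib ref with
      | none => filtered
      | some bibcode =>
        if bibcode ≠ "" ∧ PySem.Str.slice bibcode (some 4) (some 9) ∉ pvReview then
          let filtered1 := if filtered.contains bibcode then filtered else filtered.insert bibcode []
          filtered1.modify bibcode [] (fun l => l ++ [ref])
        else filtered) d
    = (rs.filter pvKeep).foldl (fun d r => d.modify (pvKey r) [] (fun l => l ++ [r])) d := by
  induction rs generalizing d with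
  | nil => rfl
  | cons ref rs ih =>
    simp only [List.foldl_cons, List.filter_cons]
    cases hb : pvGetBib ref with
    | none =>
      have hk : pvKeep ref = false := by simp [pvKeep, hb]
      rw [hk]
      simp only [Bool.false_eq_true, if_false]
      exact ih d
    | some b =>
      by_cases hc : b ≠ "" ∧ PySem.Str.slice b (some 4) (some 9) ∉ pvReview
      · have hk : pvKeep ref = true := by simp [pvKeep, hb, hc.1, hc.2]
        have hkey : pvKey ref = b := by simp [pvKey, hb]
        simp only [hk, if_true]
        rw [if_pos hc]
        rw [pv_stepA_eq d b ref]
        rw [List.foldl_cons, hkey]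
        exact ih _
      · have hk : pvKeep ref = false := by
          simp only [pvKeep, hb]
          rcases not_and_or.mp hc with h1 | h2
          · simp at h1; simp [h1]
          · simp at h2; simp [h2]
        simp only [hk, Bool.false_eq_true, if_false]
        rw [if_neg hc]
        exact ih d

-- items of a dict with nodup keys are keys paired with their values
theorem pv_items_eq_keys_map {κ ν : Type} [BEq κ] [LawfulBEq κ]
    (d : PySem.Dict κ ν) (h : d.keys.Nodup) (d0 : ν) :
    d.items = d.keys.map (fun k => (k, d.getD k d0)) := by
  show d.items = (d.items.map (fun p => p.1)).map (fun k => (k, d.getD k d0))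
  rw [List.map_map]
  symm
  rw [List.map_congr_left (g := id) ?_]
  · simp
  · intro p hp
    have : d.getD p.1 d0 = p.2 := by
      exact PySem.Dict.getD_of_mem_items d (by exact hp) h d0
    simp [Function.comp, this]

-- the value stored under c is the filter of the kept records by key
theorem pv_getD_eq (kept : List (List (String × String))) (c : String) :
    (kept.foldl (fun d r => d.modify (pvKey r) [] (fun l => l ++ [r])) PySem.Dict.empty).getD c []
    = kept.filter (fun r => pvKey r == c) := by
  have h1 : kept.foldl (fun d r => d.modify (pvKey r) [] (fun l => l ++ [r])) PySem.Dict.empty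
      = (kept.map (fun r => (pvKey r, r))).foldl
          (fun d p => d.modify p.1 [] (fun l => l ++ [p.2])) PySem.Dict.empty := by
    rw [List.foldl_map]
  rw [h1, PySem.Dict.getD_foldl_modify_append, PySem.Dict.getD_empty, List.nil_append,
    List.filter_map, List.map_map]
  rw [show ((fun (x : String × List (String × String)) => x.2) ∘ (fun r => (pvKey r, r))) = id from rfl,
    List.map_id]
  exact List.filter_congr (fun r _ => rfl)

-- ===== VERDICT (by name: the statement is the Claim_ definition above) =====
theorem build_bibcode_index_spec : Claim_equal_build_bibcode_index := by
  intro rs _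
  show build_bibcode_index rs = build_bibcode_index_alt rs
  unfold build_bibcode_index build_bibcode_index_alt
  rw [pv_fold_eq]
  set kept := rs.filter pvKeep with hkept
  set D := kept.foldl (fun d r => d.modify (pvKey r) [] (fun l => l ++ [r])) PySem.Dict.empty with hD
  have hkeys : D.keys = PySem.List.dedup (kept.map pvKey) := by
    rw [hD, PySem.Dict.keys_foldl_modify_key kept pvKey [] (fun _ r l => l ++ [r]),
      PySem.Dict.keys_empty]
    rfl
  have hnd : D.keys.Nodup := by
    rw [hD]
    exact PySem.Dict.nodup_keys_foldl_modify_key kept pvKey [] (fun _ r l => l ++ [r])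
      PySem.Dict.empty PySem.Dict.nodup_keys_empty
  rw [pv_items_eq_keys_map D hnd [], hkeys]
  exact List.map_congr_left (by intro k _; rw [hD, pv_getD_eq])
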